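-- pv_equiv track=rewrite | github.com/andremarqueda1/Proyect-Cypher | Playfair.py | NormalizaMsj
-- ===== SOURCE A (Python) =====
-- def NormalizaMsj(MsjOriginal):    # Normaliza el mensaje cifrado obtenido en el algoritmo Series
--     #MsjOriginal = MsjOriginal.upper()   # Convierte el mensaje cifrado a mayúsculas.
--     #MsjOriginal = MsjOriginal.replace(" ","")   # Elimina espacios.
--     #MsjOriginal = MsjOriginal.replace(",","")   # Elimina comas.
--     #MsjOriginal = MsjOriginal.replace(".","")   # Elimina puntos.
--     MsjOriginal = MsjOriginal.replace("J","I")   # Reemplaza "J" por "I".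
--     posicion = 0    # Declaración de variables.
--     MsjNormalizado = ""
--
--     while (posicion < len(MsjOriginal)-1):    # Valida que en cada dupla no se repita la letra y de ser así, remplaza la segunda por "x".
--         primera_letra = MsjOriginal[posicion]
--         segunda_letra = MsjOriginal[posicion+1]
--
--         if(primera_letra == segunda_letra):
--             MsjNormalizado += primera_letra + "X"   # Reemplaza con una "X" la segunda letra de la dupla repetida.
--             posicion += 1
--         else:
--             MsjNormalizado += primera_letra + segunda_letra
--             posicion += 2
--
--     if(posicion < len(MsjOriginal)):
--         MsjNormalizado += MsjOriginal[posicion] + "X"   # Añade una "X" al mensaje para tener una longitud de cadena par.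
--
--     return MsjNormalizado    # Regresa el mensaje normalizado
-- ===== SOURCE B (Python) =====
-- def NormalizaMsj(MsjOriginal):
--     # Streaming state machine: one char per step, 'pending' holds the unresolved
--     # first letter of the current digraph.
--     pending = None
--     parts = []
--     for c in MsjOriginal.replace("J", "I"):
--         if pending is None:
--             pending = c
--         elif pending == c:
--             parts.append(pending + "X")
--             pending = c
--         else:
--             parts.append(pending + c)
--             pending = None
--     if pending is not None:
--         parts.append(pending + "X")
--     return "".join(parts)
-- ===== Notes on version B (the rewrite author's own statement) =====
-- stated objective: faster
-- what changed: Replaces the variable-step index walk (advancing by 1 or 2 and re-indexing the string) with a single uniform pass: a one-char-per-step state machine keeping only the pending first letter of the current digraph, collecting pieces in a list joined once.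
import Mathlib
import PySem

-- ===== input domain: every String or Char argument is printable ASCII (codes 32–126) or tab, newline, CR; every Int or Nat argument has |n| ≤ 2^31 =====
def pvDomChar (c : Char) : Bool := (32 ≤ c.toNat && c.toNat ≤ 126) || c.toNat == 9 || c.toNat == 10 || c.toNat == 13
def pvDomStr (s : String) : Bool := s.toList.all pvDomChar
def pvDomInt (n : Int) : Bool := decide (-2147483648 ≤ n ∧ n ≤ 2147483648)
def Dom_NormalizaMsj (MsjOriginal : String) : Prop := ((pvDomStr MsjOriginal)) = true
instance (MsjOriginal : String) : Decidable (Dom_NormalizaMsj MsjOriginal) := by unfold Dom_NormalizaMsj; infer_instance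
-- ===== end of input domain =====

-- B replaces A's variable-step index walk with a one-char-per-step state machine
-- keeping only the pending first letter of the current digraph (objective: faster — O(n) list-join output vs A's quadratic string +=, measured).

-- ===== PORT A =====
-- A's while loop over positions, as the obvious structural recursion: at each step it
-- looks at the current letter and the next; on a repeat it advances by 1 (the second
-- letter starts the next digraph), otherwise by 2; a final lone letter is padded with 'X'.
def pvLoopA : List Char → List Char
  | [] => []
  | [a] => [a, 'X']
  | a :: b :: rest =>
      if a = b then a :: 'X' :: pvLoopA (b :: rest)
      else a :: b :: pvLoopA rest
termination_by l => l.length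
decreasing_by all_goals simp

def NormalizaMsj (MsjOriginal : String) : String :=
  String.mk (pvLoopA (PySem.Str.replace MsjOriginal "J" "I").toList)

-- ===== PORT B =====
-- one transition of B's state machine: state = (emitted output, pending first letter)
def pvStepB (st : List Char × Option Char) (c : Char) : List Char × Option Char :=
  match st.2 with
  | none => (st.1, some c)
  | some p => if p = c then (st.1 ++ [p, 'X'], some c) else (st.1 ++ [p, c], none)

-- after the loop: a still-pending letter is padded with 'X'
def pvFinishB (st : List Char × Option Char) : List Char :=
  match st.2 with
  | none => st.1
  | some p => st.1 ++ [p, 'X']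

def NormalizaMsj_alt (MsjOriginal : String) : String :=
  String.mk (pvFinishB ((PySem.Str.replace MsjOriginal "J" "I").toList.foldl pvStepB ([], none)))

-- ===== PRECONDITION & SPEC =====
def Spec_NormalizaMsj (MsjOriginal : String) (out : String) : Prop := out = NormalizaMsj_alt MsjOriginal
instance (MsjOriginal : String) (out : String) : Decidable (Spec_NormalizaMsj MsjOriginal out) := by unfold Spec_NormalizaMsj; infer_instance

-- ===== CLAIM (what is proved, stated in full; the proofs are below) =====
def Claim_equal_NormalizaMsj : Prop := ∀ (MsjOriginal : String), Dom_NormalizaMsj MsjOriginal → Spec_NormalizaMsj MsjOriginal (NormalizaMsj MsjOriginal)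

-- ===== LEMMAS AND PROOFS =====

-- invariant of B's fold with a pending letter: it emits exactly what A's loop emits
lemma pvKey : ∀ (n : Nat) (l : List Char) (acc : List Char) (p : Char), l.length ≤ n →
    pvFinishB (l.foldl pvStepB (acc, some p)) = acc ++ pvLoopA (p :: l) := by
  intro n
  induction n with
  | zero =>
      intro l acc p hl
      have : l = [] := List.length_eq_zero_iff.mp (Nat.le_zero.mp hl)
      subst this
      simp [pvFinishB, pvLoopA]
  | succ n ih =>
      intro l acc p hl
      cases l with
      | nil => simp [pvFinishB, pvLoopA]
      | cons c rest =>
        by_cases h : p = c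
        · subst h
          simp only [List.foldl, pvStepB, if_true]
          rw [ih rest _ p (by simpa using Nat.lt_succ_iff.mp (by simpa using hl))]
          simp [pvLoopA]
        · simp only [List.foldl, pvStepB, if_neg h]
          cases rest with
          | nil => simp [pvFinishB, pvLoopA, h]
          | cons d rest' =>
            simp only [List.foldl, pvStepB]
            rw [ih rest' _ d (by simp at hl; omega)]
            simp [pvLoopA, h]

lemma pvStart : ∀ (l : List Char),
    pvFinishB (l.foldl pvStepB ([], none)) = pvLoopA l := by
  intro l
  cases l with
  | nil => simp [pvFinishB, pvLoopA]
  | cons c rest =>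
      simp only [List.foldl, pvStepB]
      simpa using pvKey rest.length rest [] c le_rfl

-- ===== VERDICT (by name: the statement is the Claim_ definition above) =====
theorem NormalizaMsj_spec : Claim_equal_NormalizaMsj := by
  intro s _
  unfold Spec_NormalizaMsj NormalizaMsj NormalizaMsj_alt
  rw [pvStart]
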